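-- pv_equiv track=rewrite | github.com/bloa-lang/bloa-src | bloa/interpreter.py | indent_level
-- ===== SOURCE A (Python) =====
-- def indent_level(line: str) -> int:
--     count = 0
--     for ch in line:
--         if ch == " ":
--             count += 1
--         elif ch == "\t":
--             count += 4
--         else:
--             break
--     return count
-- ===== SOURCE B (Python) =====
-- def indent_level(line: str) -> int:
--     prefix = line[:len(line) - len(line.lstrip(" \t"))]
--     return prefix.count(" ") + 4 * prefix.count("\t")
-- ===== Notes on version B (the rewrite author's own statement) =====
-- stated objective: idiomatic
-- what changed: Replaces the character-by-character loop with a break by isolating the whitespace prefix via lstrip and summing weights with two count passes.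
import Mathlib
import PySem

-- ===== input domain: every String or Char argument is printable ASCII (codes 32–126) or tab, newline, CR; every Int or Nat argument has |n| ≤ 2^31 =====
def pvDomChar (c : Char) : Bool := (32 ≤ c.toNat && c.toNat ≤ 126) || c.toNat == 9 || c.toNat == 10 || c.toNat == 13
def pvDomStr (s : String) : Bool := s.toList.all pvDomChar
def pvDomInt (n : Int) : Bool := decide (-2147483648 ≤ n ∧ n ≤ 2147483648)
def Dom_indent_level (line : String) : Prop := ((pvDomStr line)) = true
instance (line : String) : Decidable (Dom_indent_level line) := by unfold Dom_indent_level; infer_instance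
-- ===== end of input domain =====

-- B computes the same weighted indentation by isolating the space/tab prefix with lstrip
-- and counting, instead of A's character loop with a break (objective: more idiomatic).

-- ===== PORT A =====
-- 'for ch in line: if/elif/else break' with accumulator count
def indentLoopA : List Char → Int → Int
  | [], count => count
  | ch :: rest, count =>
    if ch == ' ' then indentLoopA rest (count + 1)
    else if ch == '\t' then indentLoopA rest (count + 4)
    else count

def indent_level (line : String) : Int := indentLoopA line.toList 0

-- ===== PORT B =====
-- hand port of line.lstrip(" \t") (no PySem primitive for lstrip with a chars argument):
-- drop leading characters that are in the set {' ', '\t'} — exact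
def lstripSpaceTab (cs : List Char) : List Char :=
  cs.dropWhile (fun c => c == ' ' || c == '\t')

def indent_level_alt (line : String) : Int :=
  let pre := PySem.Str.slice line none
      (some ((PySem.Str.len line : Int) - (lstripSpaceTab line.toList).length))
  (PySem.Str.count pre " " : Int) + 4 * (PySem.Str.count pre "\t" : Int)

-- ===== PRECONDITION & SPEC =====
def Spec_indent_level (line : String) (out : Int) : Prop := out = indent_level_alt line
instance (line : String) (out : Int) : Decidable (Spec_indent_level line out) := by unfold Spec_indent_level; infer_instance

-- ===== CLAIM (what is proved, stated in full; the proofs are below) =====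
def Claim_equal_indent_level : Prop := ∀ (line : String), Dom_indent_level line → Spec_indent_level line (indent_level line)

-- ===== LEMMAS AND PROOFS =====

-- single-character substring count agrees with element count
theorem go_step (c h : Char) (t : List Char) (n acc : Nat) :
    PySem.Chars.count.go [c] (n+1) (h::t) acc =
      if c == h then PySem.Chars.count.go [c] n t (acc+1)
      else PySem.Chars.count.go [c] n t acc := by
  rw [PySem.Chars.count.go.eq_def]
  simp [List.isPrefixOf]

theorem countGo_single (c : Char) (l : List Char) (acc : Nat) :
    PySem.Chars.count.go [c] l.length l acc = acc + l.count c := by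
  induction l generalizing acc with
  | nil => rw [PySem.Chars.count.go.eq_def]; simp
  | cons h t ih =>
      rw [List.length_cons, go_step, List.count_cons]
      by_cases hc : c = h
      · rw [if_pos (by simp [hc]), ih, if_pos (by simp [hc])]; omega
      · rw [if_neg (by simp [hc]), ih, if_neg (by simp [Ne.symm hc])]
        simp

theorem count_single (c : Char) (l : List Char) :
    PySem.Chars.count l [c] = l.count c := by
  have := countGo_single c l 0
  simpa [PySem.Chars.count] using this

-- the slice is exactly the space/tab takeWhile prefix
theorem prefix_eq_takeWhile (l : List Char) :
    l.take (l.length - (lstripSpaceTab l).length) =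
      l.takeWhile (fun c => c == ' ' || c == '\t') := by
  have hpre := List.takeWhile_prefix (l := l) (p := fun c => c == ' ' || c == '\t')
  have hlen : (l.takeWhile (fun c => c == ' ' || c == '\t')).length =
      l.length - (lstripSpaceTab l).length := by
    have := List.takeWhile_append_dropWhile (p := fun c => c == ' ' || c == '\t') (l := l)
    have hl : (l.takeWhile (fun c => c == ' ' || c == '\t')).length +
        (l.dropWhile (fun c => c == ' ' || c == '\t')).length = l.length := by
      rw [← List.length_append, this]
    simp [lstripSpaceTab]; omega
  rw [← hlen]
  conv_rhs => rw [List.prefix_iff_eq_take.mp hpre]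

-- A's loop on any list equals the weighted counts of its space/tab prefix
theorem loopA_eq (l : List Char) (acc : Int) :
    indentLoopA l acc =
      acc + ((l.takeWhile (fun c => c == ' ' || c == '\t')).count ' ' : Int)
          + 4 * ((l.takeWhile (fun c => c == ' ' || c == '\t')).count '\t' : Int) := by
  induction l generalizing acc with
  | nil => simp [indentLoopA]
  | cons h t ih =>
      by_cases hs : h = ' '
      · subst hs; simp [indentLoopA, List.takeWhile, ih]; ring
      · by_cases ht : h = '\t'
        · subst ht; simp [indentLoopA, List.takeWhile, ih]; ring
        · have hb : (h == ' ' || h == '\t') = false := by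
            simp [hs, ht]
          simp [indentLoopA, List.takeWhile, hs, ht, hb]

-- ===== VERDICT (by name: the statement is the Claim_ definition above) =====
theorem indent_level_spec : Claim_equal_indent_level := by
  intro line _
  unfold Spec_indent_level indent_level indent_level_alt
  have hle : (lstripSpaceTab line.toList).length ≤ line.toList.length := by
    simpa [lstripSpaceTab] using List.length_dropWhile_le (p := fun c => c == ' ' || c == '\t') (l := line.toList)
  have hb : (0 : Int) ≤ (PySem.Str.len line : Int) - ((lstripSpaceTab line.toList).length : Int) := by
    simp only [PySem.Str.len]
    omega
  have hpre : (PySem.Str.slice line none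
      (some ((PySem.Str.len line : Int) - (lstripSpaceTab line.toList).length))).toList =
      line.toList.takeWhile (fun c => c == ' ' || c == '\t') := by
    rw [PySem.Str.toList_slice, PySem.Chars.slice_eq_listSlice, PySem.List.slice_to _ hb]
    have : ((PySem.Str.len line : Int) - ((lstripSpaceTab line.toList).length : Int)).toNat =
        line.toList.length - (lstripSpaceTab line.toList).length := by
      simp only [PySem.Str.len]
      omega
    rw [this, prefix_eq_takeWhile]
  simp only [PySem.Str.count_eq, hpre]
  rw [loopA_eq]
  rw [show (" ".toList) = [' '] from rfl, show ("\t".toList) = ['\t'] from rfl]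
  rw [count_single, count_single]
  ring
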